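-- pv_equiv track=rewrite | github.com/onooff/algorithm | programmers/p12938.py | solution
-- ===== SOURCE A (Python) =====
-- def solution(n, s):
--     d = s//n
--     if d == 0:
--         return [-1]
--     else:
--         answer = [d for _ in range(n)]
--         r = s % n
--         for i in range(r):
--             answer[-(i+1)] += 1
--         return answer
-- ===== SOURCE B (Python) =====
-- def solution(n, s):
--     if s // n == 0:
--         return [-1]
--     answer = []
--     rem, cnt = s, n
--     while cnt > 0:
--         q = rem // cnt
--         answer.append(q)
--         rem -= q
--         cnt -= 1
--     return answer
-- ===== Notes on version B (the rewrite author's own statement) =====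
-- stated objective: alternative
-- what changed: Replaces A's two-stage construction (build n copies of s//n, then a second loop incrementing the last s%n slots in place) with a single greedy pass that never computes the remainder: each next part is floor(remaining_sum / remaining_count), subtracted from the running remainder.
import Mathlib
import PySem

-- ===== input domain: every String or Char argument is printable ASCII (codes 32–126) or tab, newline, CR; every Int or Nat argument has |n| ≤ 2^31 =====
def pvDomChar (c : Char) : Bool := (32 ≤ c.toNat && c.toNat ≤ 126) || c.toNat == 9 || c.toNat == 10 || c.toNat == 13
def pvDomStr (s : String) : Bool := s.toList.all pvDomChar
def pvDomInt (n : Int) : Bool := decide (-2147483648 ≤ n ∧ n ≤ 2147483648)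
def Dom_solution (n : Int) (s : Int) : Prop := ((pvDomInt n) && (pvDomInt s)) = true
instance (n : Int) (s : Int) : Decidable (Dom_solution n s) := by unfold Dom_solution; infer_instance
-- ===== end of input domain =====

-- B replaces A's fill-then-increment construction with one greedy pass: each part is
-- floor(remaining sum / remaining count); same cost, no remainder loop (objective: alternative).

-- ===== PORT A =====
def solution (n : Int) (s : Int) : List Int :=
  let d := PySem.Int.floordiv s n
  if d = 0 then [-1]
  else
    let answer := (PySem.List.pyRange 0 n 1).map (fun _ => d)
    let r := PySem.Int.mod s n
    (PySem.List.pyRange 0 r 1).foldl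
      (fun ans i =>
        PySem.List.pySetD ans (-(i+1)) (PySem.List.pyGetD ans (-(i+1)) 0 + 1)) answer

-- ===== PORT B =====
-- the while loop of Source B: state (answer, rem, cnt); stops when cnt ≤ 0
def fairLoop (answer : List Int) (rem : Int) (cnt : Int) : List Int :=
  if h : 0 < cnt then
    let q := PySem.Int.floordiv rem cnt
    fairLoop (answer ++ [q]) (rem - q) (cnt - 1)
  else answer
termination_by cnt.toNat
decreasing_by omega

def solution_alt (n : Int) (s : Int) : List Int :=
  if PySem.Int.floordiv s n = 0 then [-1]
  else fairLoop [] s n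

-- ===== PRECONDITION & SPEC =====
-- Pre_ excludes exactly n = 0, where Python's s // n raises ZeroDivisionError (in both A and B).
def Pre_solution (n : Int) (s : Int) : Prop := n ≠ 0
instance (n : Int) (s : Int) : Decidable (Pre_solution n s) := by unfold Pre_solution; infer_instance
def pvWitness_solution : Int × Int := (3, 7)

def Spec_solution (n : Int) (s : Int) (out : List Int) : Prop := out = solution_alt n s
instance (n : Int) (s : Int) (out : List Int) : Decidable (Spec_solution n s out) := by unfold Spec_solution; infer_instance

-- ===== CLAIM (what is proved, stated in full; the proofs are below) =====
def Claim_equal_solution : Prop := ∀ (n : Int) (s : Int), Dom_solution n s → Pre_solution n s → Spec_solution n s (solution n s)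

-- ===== LEMMAS AND PROOFS =====

-- Python list store at a negative index: xs[-k] = v is xs.set (len - k) v when 1 ≤ k ≤ len.
theorem pySetD_neg_natCast' {α : Type} (xs : List α) (k : Nat) (v : α)
    (h1 : 0 < k) (h2 : k ≤ xs.length) :
    PySem.List.pySetD xs (-(k : Int)) v = xs.set (xs.length - k) v := by
  simp [PySem.List.pySetD, PySem.List.pySet?, PySem.List.pyIdx?]
  rw [if_neg (by omega), if_pos h2]
  simp

theorem set_last_replicate (m : Nat) (d v : Int) (hm : 0 < m) :
    (List.replicate m d).set (m - 1) v = List.replicate (m - 1) d ++ [v] := by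
  induction m with
  | zero => omega
  | succ j ih =>
    cases j with
    | zero => simp
    | succ j' =>
      simp only [List.replicate_succ, Nat.add_sub_cancel, List.set_cons_succ]
      congr 1
      simpa using ih (by omega)

-- A's loop invariant: after k increments at the tail, the list is (n-k) copies of d then k of d+1.
theorem loop_inv (d : Int) (n k : Nat) (hk : k ≤ n) :
    (PySem.List.pyRange 0 k 1).foldl
      (fun ans i =>
        PySem.List.pySetD ans (-(i+1)) (PySem.List.pyGetD ans (-(i+1)) 0 + 1))
      (List.replicate n d)
    = List.replicate (n - k) d ++ List.replicate k (d + 1) := by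
  induction k with
  | zero => simp [PySem.List.pyRange_one_eq_nil]
  | succ k ih =>
    have hk' : k ≤ n := Nat.le_of_succ_le hk
    have hstep : ((k : Int) : Int) + 1 = ((k + 1 : Nat) : Int) := by push_cast; ring
    rw [show ((k + 1 : Nat) : Int) = (k : Int) + 1 by push_cast; ring,
        PySem.List.pyRange_one_succ_right (by exact_mod_cast Nat.zero_le k),
        List.foldl_append, ih hk']
    simp only [List.foldl_cons, List.foldl_nil]
    have hlen : (List.replicate (n - k) d ++ List.replicate k (d + 1)).length = n := by
      simp; omega
    have hget : PySem.List.pyGetD (List.replicate (n - k) d ++ List.replicate k (d + 1))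
        (-((k : Int) + 1)) 0 = d := by
      rw [hstep, PySem.List.pyGetD_neg_natCast _ _ _ (by omega) (by omega)]
      have hlt : (List.replicate (n - k) d ++ List.replicate k (d + 1)).length - (k + 1)
          < (List.replicate (n - k) d).length := by simp; omega
      rw [List.getElem_append_left hlt]
      simp
    rw [hget, hstep, pySetD_neg_natCast' _ _ _ (by omega) (by omega), hlen]
    rw [List.set_append, if_pos (by simp; omega)]
    rw [show n - (k+1) = (n - k) - 1 by omega,
        set_last_replicate (n - k) d (d + 1) (by omega)]
    rw [List.append_assoc]
    simp [List.replicate_succ]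

-- floor-division facts for a known quotient/remainder pair
theorem fd_mod_of_qr (q m r : Int) (hm : 0 < m) (hr0 : 0 ≤ r) (hrm : r < m) :
    PySem.Int.floordiv (q * m + r) m = q ∧ PySem.Int.mod (q * m + r) m = r := by
  have hq : PySem.Int.floordiv (q * m + r) m = q := by
    rw [PySem.Int.floordiv_eq_iff_of_pos hm]
    constructor <;> nlinarith
  refine ⟨hq, ?_⟩
  have := PySem.Int.floordiv_mul_add_mod (q * m + r) m
  rw [hq] at this
  omega

-- B's loop: starting from any rem and positive cnt, it appends the canonical split.
theorem fairLoop_eq (c : Nat) (acc : List Int) (rem cnt : Int)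
    (hc : cnt = (c : Int)) (hpos : 0 < c) :
    fairLoop acc rem cnt
      = acc ++ List.replicate (c - (PySem.Int.mod rem cnt).toNat) (PySem.Int.floordiv rem cnt)
            ++ List.replicate (PySem.Int.mod rem cnt).toNat (PySem.Int.floordiv rem cnt + 1) := by
  induction c generalizing acc rem cnt with
  | zero => omega
  | succ c' ih =>
    subst hc
    have hcpos : (0 : Int) < ((c' + 1 : Nat) : Int) := by exact_mod_cast hpos
    set q := PySem.Int.floordiv rem ((c' + 1 : Nat) : Int) with hqdef
    set r := PySem.Int.mod rem ((c' + 1 : Nat) : Int) with hrdef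
    have hr0 : 0 ≤ r := PySem.Int.mod_nonneg _ hcpos
    have hrm : r < ((c' + 1 : Nat) : Int) := PySem.Int.mod_lt _ hcpos
    have hsum : q * ((c' + 1 : Nat) : Int) + r = rem := PySem.Int.floordiv_mul_add_mod rem _
    rw [fairLoop, dif_pos hcpos]
    cases Nat.eq_zero_or_pos c' with
    | inl h0 =>
      subst h0
      have hr : r = 0 := by omega
      have hq : q = rem := by omega
      rw [fairLoop, dif_neg (by norm_num)]
      simp [hr, hq]
    | inr hpos' =>
      have hc' : ((c' + 1 : Nat) : Int) - 1 = ((c' : Nat) : Int) := by push_cast; ring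
      have hrem' : rem - q = q * ((c' : Nat) : Int) + r := by push_cast at hsum ⊢; linarith
      have hc'pos : (0 : Int) < ((c' : Nat) : Int) := by exact_mod_cast hpos'
      by_cases hlast : r = ((c' : Nat) : Int)
      · -- remainder fills the whole rest: rem - q = (q+1) * c'
        have hrem'' : rem - q = (q + 1) * ((c' : Nat) : Int) + 0 := by
          rw [hrem', hlast]; ring
        have hfm := fd_mod_of_qr (q + 1) ((c' : Nat) : Int) 0 hc'pos (by omega) hc'pos
        rw [hc', ih (acc ++ [q]) (rem - q) _ rfl hpos']
        rw [hrem'', hfm.1, hfm.2]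
        have hrt : r.toNat = c' := by omega
        simp only [hrt, Int.toNat_zero, Nat.sub_zero,
          List.replicate_zero, List.append_assoc, List.append_nil]
        rw [show c' + 1 - c' = 1 by omega]
        simp
      · have hrlt : r < ((c' : Nat) : Int) := lt_of_le_of_ne (by omega) hlast
        have hfm := fd_mod_of_qr q ((c' : Nat) : Int) r hc'pos hr0 hrlt
        rw [hc', ih (acc ++ [q]) (rem - q) _ rfl hpos']
        rw [hrem', hfm.1, hfm.2]
        have h1 : c' + 1 - r.toNat = (c' - r.toNat) + 1 := by omega
        rw [h1, List.replicate_succ]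
        simp

theorem solution_eq (n s : Int) (hn : n ≠ 0) : solution n s = solution_alt n s := by
  unfold solution solution_alt
  by_cases hd : PySem.Int.floordiv s n = 0
  · simp [hd]
  · simp only [hd, if_false]
    rcases lt_or_gt_of_ne hn with hneg | hpos
    · -- n < 0: A's ranges are empty; B's loop exits immediately
      have hr := PySem.Int.mod_neg_bounds (a := s) (b := n) hneg
      rw [PySem.List.pyRange_one_eq_nil (le_of_lt hneg),
          PySem.List.pyRange_one_eq_nil hr.2,
          fairLoop, dif_neg (by omega)]
      simp
    · -- n > 0: both sides are the canonical (n-r, r) split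
      have hr0 := PySem.Int.mod_nonneg (a := s) hpos
      have hrn := PySem.Int.mod_lt (a := s) hpos
      set r := PySem.Int.mod s n with hrdef
      have hmap : (PySem.List.pyRange 0 n 1).map
          (fun _ => PySem.Int.floordiv s n) = List.replicate n.toNat (PySem.Int.floordiv s n) := by
        rw [PySem.List.pyRange_one]
        simp only [List.map_map, Function.comp_def, List.map_const', List.length_range]
        congr 1
        omega
      rw [hmap, show r = ((r.toNat : Nat) : Int) by omega,
          loop_inv _ n.toNat r.toNat (by omega),
          fairLoop_eq n.toNat [] s n (by omega) (by omega)]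
      rw [← hrdef, List.nil_append]

-- ===== VERDICT (by name: the statement is the Claim_ definition above) =====
theorem solution_spec : Claim_equal_solution := by
  intro n s _ hpre
  exact solution_eq n s hpre
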